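-- pv_equiv track=rewrite | github.com/ManassehV7809/DeepCPDS | rq2.py | shd
-- ===== SOURCE A (Python) =====
-- from typing import Dict, List, Tuple, Optional
--
-- def shd(learned_edges: List[Tuple[str, str]], true_edges: List[Tuple[str, str]]) -> int:
--     L = set(learned_edges)
--     T = set(true_edges)
--     extra = L - T
--     missing = T - L
--
--     # treat reversed edges as 1 edit (common SHD convention)
--     reversed_edges = set()
--     for (u, v) in extra:
--         if (v, u) in missing:
--             reversed_edges.add((u, v))
--
--     return int(len(extra) + len(missing) - len(reversed_edges))
-- ===== SOURCE B (Python) =====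
-- def shd(learned_edges, true_edges):
--     # Group directed edges by their unordered endpoint pair and sum a per-pair
--     # edit cost (extras + missings, a reversal counted as one edit).
--     L = set(learned_edges)
--     T = set(true_edges)
--     pairs = dict.fromkeys((u, v) if u <= v else (v, u)
--                           for (u, v) in learned_edges + true_edges)
--     total = 0
--     for (a, b) in pairs:
--         lf = (a, b) in L
--         tf = (a, b) in T
--         lr = a != b and (b, a) in L
--         tr = a != b and (b, a) in T
--         ef = lf and not tf
--         er = lr and not tr
--         mf = tf and not lf
--         mr = tr and not lr
--         total += ef + er + mf + mr - (ef and mr) - (er and mf)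
--     return total
-- ===== Notes on version B (the rewrite author's own statement) =====
-- stated objective: alternative
-- what changed: Instead of forming set differences and scanning the extras for reversals, B groups the directed edges by unordered endpoint pair and sums a per-pair edit cost (extra/missing per direction, minus one per reversal) in a single pass over the distinct pairs.
import Mathlib
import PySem

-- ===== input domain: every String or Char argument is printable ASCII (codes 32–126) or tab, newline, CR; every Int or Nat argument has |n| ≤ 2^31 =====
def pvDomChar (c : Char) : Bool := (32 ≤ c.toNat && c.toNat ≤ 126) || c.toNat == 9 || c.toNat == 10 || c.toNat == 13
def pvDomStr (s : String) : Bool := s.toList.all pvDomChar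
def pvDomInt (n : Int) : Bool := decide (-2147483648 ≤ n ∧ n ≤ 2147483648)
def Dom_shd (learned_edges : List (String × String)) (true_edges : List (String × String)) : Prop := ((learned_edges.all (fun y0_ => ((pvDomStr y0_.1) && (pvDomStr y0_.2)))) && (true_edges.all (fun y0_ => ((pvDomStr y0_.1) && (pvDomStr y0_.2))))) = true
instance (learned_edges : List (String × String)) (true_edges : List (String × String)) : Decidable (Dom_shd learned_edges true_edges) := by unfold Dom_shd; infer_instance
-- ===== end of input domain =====

-- B groups the directed edges by unordered endpoint pair and sums a per-pair edit cost; same value, same asymptotic cost as A.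

-- ===== PORT A =====
def shd (learned_edges : List (String × String)) (true_edges : List (String × String)) : Int :=
  let L : PySem.Set (String × String) := PySem.Set.ofList learned_edges
  let T : PySem.Set (String × String) := PySem.Set.ofList true_edges
  let extra := PySem.Set.diff L T
  let missing := PySem.Set.diff T L
  let reversed_edges : PySem.Set (String × String) :=
    extra.foldl (fun r e =>
      if PySem.Set.contains missing (e.2, e.1) then PySem.Set.add r (e.1, e.2) else r)
      PySem.Set.empty
  ((extra.length : Int) + (missing.length : Int) - (reversed_edges.length : Int))

-- ===== PORT B =====
def pvMinKey (e : String × String) : String × String :=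
  if e.1 ≤ e.2 then (e.1, e.2) else (e.2, e.1)

def pvPairCost (L T : PySem.Set (String × String)) (k : String × String) : Int :=
  let lf := PySem.Set.contains L k
  let tf := PySem.Set.contains T k
  let lr := (k.1 != k.2) && PySem.Set.contains L (k.2, k.1)
  let tr := (k.1 != k.2) && PySem.Set.contains T (k.2, k.1)
  let ef := lf && !tf
  let er := lr && !tr
  let mf := tf && !lf
  let mr := tr && !lr
  (if ef then 1 else 0) + (if er then 1 else 0) + (if mf then 1 else 0) + (if mr then 1 else 0)
    - (if ef && mr then 1 else 0) - (if er && mf then 1 else 0)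

def shd_alt (learned_edges : List (String × String)) (true_edges : List (String × String)) : Int :=
  let L : PySem.Set (String × String) := PySem.Set.ofList learned_edges
  let T : PySem.Set (String × String) := PySem.Set.ofList true_edges
  let pairs := PySem.List.dedup ((learned_edges ++ true_edges).map pvMinKey)
  pairs.foldl (fun total k => total + pvPairCost L T k) 0

-- ===== PRECONDITION & SPEC =====
def Spec_shd (learned_edges : List (String × String)) (true_edges : List (String × String)) (out : Int) : Prop := out = shd_alt learned_edges true_edges
instance (learned_edges : List (String × String)) (true_edges : List (String × String)) (out : Int) : Decidable (Spec_shd learned_edges true_edges out) := by unfold Spec_shd; infer_instance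

-- ===== CLAIM (what is proved, stated in full; the proofs are below) =====
def Claim_equal_shd : Prop := ∀ (learned_edges : List (String × String)) (true_edges : List (String × String)), Dom_shd learned_edges true_edges → Spec_shd learned_edges true_edges (shd learned_edges true_edges)

-- ===== LEMMAS AND PROOFS =====

-- the fold building A's reversed set appends exactly the filtered elements
lemma pv_fold_add_filter (p : String × String → Bool) :
    ∀ (xs s : List (String × String)), xs.Nodup → (∀ x ∈ xs, x ∉ s) →
    xs.foldl (fun r e => if p e then PySem.Set.add r (e.1, e.2) else r) s = s ++ xs.filter p := by
  intro xs
  induction xs with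
  | nil => intro s _ _; simp
  | cons x t ih =>
    intro s hnd hdis
    simp only [List.foldl_cons, List.filter_cons]
    cases hp : p x with
    | false =>
      simpa [hp] using ih s hnd.of_cons (fun y hy => hdis y (List.mem_cons_of_mem _ hy))
    | true =>
      have hx : (x.1, x.2) ∉ s := by
        rw [Prod.mk.eta]; exact hdis x List.mem_cons_self
      have hstep : PySem.Set.add s (x.1, x.2) = s ++ [x] := by
        rw [PySem.Set.add_of_not_mem hx, Prod.mk.eta]
      have hdis' : ∀ y ∈ t, y ∉ s ++ [x] := by
        intro y hy
        simp only [List.mem_append, List.mem_singleton]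
        rintro (h | rfl)
        · exact hdis y (List.mem_cons_of_mem _ hy) h
        · exact (List.nodup_cons.mp hnd).1 hy
      simp only [hstep]
      rw [if_pos trivial, if_pos trivial, ih (s ++ [x]) hnd.of_cons hdis']
      simp

lemma pv_sum_indicator (ks : List (String × String)) (a : String × String)
    (hnd : ks.Nodup) (ha : a ∈ ks) :
    (ks.map (fun k => if a = k then (1 : Int) else 0)).sum = 1 := by
  induction ks with
  | nil => cases ha
  | cons k t ih =>
    rcases List.mem_cons.mp ha with rfl | hat
    · have hz : ∀ y ∈ t.map (fun k => if a = k then (1 : Int) else 0), y = 0 := by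
        intro y hy
        rcases List.mem_map.mp hy with ⟨c, hc, rfl⟩
        have : a ≠ c := fun h => (List.nodup_cons.mp hnd).1 (h ▸ hc)
        simp [this]
      simp [List.sum_eq_zero hz]
    · have hne : a ≠ k := fun h => (List.nodup_cons.mp hnd).1 (h ▸ hat)
      simp [hne, ih (List.nodup_cons.mp hnd).2 hat]

-- length of a list of edges as a sum, over distinct keys, of per-key counts
lemma pv_length_partition (ks : List (String × String)) (hnd : ks.Nodup) :
    ∀ (xs : List (String × String)), (∀ x ∈ xs, pvMinKey x ∈ ks) →
    ((xs.length : Int)) = (ks.map (fun k => ((xs.countP (fun x => decide (pvMinKey x = k)) : Nat) : Int))).sum := by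
  intro xs
  induction xs with
  | nil =>
    intro _
    have hz : ∀ y ∈ ks.map (fun k => (((List.countP (fun x => decide (pvMinKey x = k)) ([] : List (String × String)) : Nat)) : Int)), y = 0 := by
      intro y hy; rcases List.mem_map.mp hy with ⟨c, _, rfl⟩; simp
    simp only [List.length_nil, Nat.cast_zero]
    exact (List.sum_eq_zero hz).symm
  | cons x t ih =>
    intro hmem
    have h1 : (ks.map (fun k => (((x :: t).countP (fun x => decide (pvMinKey x = k)) : Nat) : Int))).sum
        = (ks.map (fun k => ((t.countP (fun x => decide (pvMinKey x = k)) : Nat) : Int) + (if pvMinKey x = k then (1:Int) else 0))).sum := by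
      congr 1
      apply List.map_congr_left
      intro k _
      rw [List.countP_cons]
      push_cast
      split_ifs with h1 h2 <;> simp_all
    rw [h1, PySem.List.sum_map_add_int,
        pv_sum_indicator ks (pvMinKey x) hnd (hmem x List.mem_cons_self),
        ← ih (fun y hy => hmem y (List.mem_cons_of_mem _ hy))]
    push_cast [List.length_cons]
    ring

lemma pv_countP_single (xs : List (String × String)) (hnd : xs.Nodup)
    (c : String × String) (p : String × String → Bool) (hp : ∀ x, p x = true ↔ x = c) :
    ((xs.countP p : Nat) : Int) = (if c ∈ xs then 1 else 0) := by
  have h1 : xs.countP p = xs.count c := by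
    unfold List.count
    apply List.countP_congr
    intro a _
    simp [hp a]
  by_cases hc : c ∈ xs
  · rw [h1, List.count_eq_one_of_mem hnd hc]; simp [hc]
  · rw [h1, List.count_eq_zero_of_not_mem hc]; simp [hc]

lemma pv_countP_pair (xs : List (String × String)) (hnd : xs.Nodup)
    (c1 c2 : String × String) (hne : c1 ≠ c2) (p : String × String → Bool)
    (hp : ∀ x, p x = true ↔ (x = c1 ∨ x = c2)) :
    ((xs.countP p : Nat) : Int) = (if c1 ∈ xs then 1 else 0) + (if c2 ∈ xs then 1 else 0) := by
  induction xs with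
  | nil => simp
  | cons x t ih =>
    have hx : x ∉ t := (List.nodup_cons.mp hnd).1
    rw [List.countP_cons]
    cases hpx : p x with
    | false =>
      have h1 : x ≠ c1 := fun h => by
        subst h; rw [(hp x).mpr (Or.inl rfl)] at hpx; cases hpx
      have h2 : x ≠ c2 := fun h => by
        subst h; rw [(hp x).mpr (Or.inr rfl)] at hpx; cases hpx
      rw [Nat.cast_add]
      rw [ih (List.nodup_cons.mp hnd).2]
      simp [List.mem_cons, Ne.symm h1, Ne.symm h2]
    | true =>
      rw [Nat.cast_add]
      rw [ih (List.nodup_cons.mp hnd).2]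
      rcases (hp x).mp hpx with rfl | rfl
      · have h2 : c2 ∈ x :: t ↔ c2 ∈ t := by simp [List.mem_cons, Ne.symm hne]
        simp [hx, h2]
        ring
      · have h1 : c1 ∈ x :: t ↔ c1 ∈ t := by simp [List.mem_cons, hne]
        simp [hx, h1]

-- per-key count of the edges whose unordered endpoint pair is (a, b)
lemma pv_cnt_eq (xs : List (String × String)) (hnd : xs.Nodup)
    (a b : String) (h12 : a ≤ b) :
    ((xs.countP (fun x => decide (pvMinKey x = (a, b))) : Nat) : Int)
      = (if (a, b) ∈ xs then 1 else 0) + (if a ≠ b ∧ (b, a) ∈ xs then 1 else 0) := by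
  by_cases hab : a = b
  · subst hab
    rw [pv_countP_single xs hnd (a, a)]
    · simp
    · rintro ⟨u, v⟩
      simp only [pvMinKey, decide_eq_true_eq]
      split_ifs with hle <;> simp only [Prod.mk.injEq] <;> tauto
  · have hba : ¬ b ≤ a := fun h => hab (le_antisymm h12 h)
    have hne : (a, b) ≠ (b, a) := by
      intro h
      exact hab (congrArg Prod.fst h)
    rw [pv_countP_pair xs hnd (a, b) (b, a) hne]
    · simp [hab]
    · rintro ⟨u, v⟩
      simp only [pvMinKey, decide_eq_true_eq]
      split_ifs with hle <;> simp only [Prod.mk.injEq]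
      · constructor
        · exact Or.inl
        · rintro (h | ⟨rfl, rfl⟩)
          · exact h
          · exact absurd hle hba
      · constructor
        · exact fun h => Or.inr ⟨h.2, h.1⟩
        · rintro (⟨rfl, rfl⟩ | ⟨rfl, rfl⟩)
          · exact absurd h12 hle
          · exact ⟨rfl, rfl⟩

lemma pv_sum_map_sub (xs : List (String × String)) (f g h : String × String → Int) :
    (xs.map (fun x => f x + g x - h x)).sum = (xs.map f).sum + (xs.map g).sum - (xs.map h).sum := by
  induction xs with
  | nil => simp
  | cons x t ih => simp only [List.map_cons, List.sum_cons, ih]; ring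

-- B's per-pair cost equals the per-pair indicator counts of A's extra / missing / reversed sets
lemma pv_cost_eq (learned_edges true_edges : List (String × String)) (a b : String) (h12 : a ≤ b) :
    pvPairCost (PySem.Set.ofList learned_edges) (PySem.Set.ofList true_edges) (a, b) =
      ((if (a, b) ∈ PySem.Set.diff (PySem.Set.ofList learned_edges) (PySem.Set.ofList true_edges) then (1:Int) else 0)
        + (if a ≠ b ∧ (b, a) ∈ PySem.Set.diff (PySem.Set.ofList learned_edges) (PySem.Set.ofList true_edges) then (1:Int) else 0))
    + ((if (a, b) ∈ PySem.Set.diff (PySem.Set.ofList true_edges) (PySem.Set.ofList learned_edges) then (1:Int) else 0)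
        + (if a ≠ b ∧ (b, a) ∈ PySem.Set.diff (PySem.Set.ofList true_edges) (PySem.Set.ofList learned_edges) then (1:Int) else 0))
    - ((if (a, b) ∈ (PySem.Set.diff (PySem.Set.ofList learned_edges) (PySem.Set.ofList true_edges)).filter
            (fun e => PySem.Set.contains (PySem.Set.diff (PySem.Set.ofList true_edges) (PySem.Set.ofList learned_edges)) (e.2, e.1)) then (1:Int) else 0)
        + (if a ≠ b ∧ (b, a) ∈ (PySem.Set.diff (PySem.Set.ofList learned_edges) (PySem.Set.ofList true_edges)).filter
            (fun e => PySem.Set.contains (PySem.Set.diff (PySem.Set.ofList true_edges) (PySem.Set.ofList learned_edges)) (e.2, e.1)) then (1:Int) else 0)) := by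
  by_cases hab : a = b
  · subst hab
    by_cases hl : (a, a) ∈ learned_edges <;> by_cases ht : (a, a) ∈ true_edges <;>
      simp [pvPairCost, List.mem_filter, PySem.Set.mem_diff,
            PySem.Set.mem_ofList, hl, ht]
  · by_cases hl1 : (a, b) ∈ learned_edges <;> by_cases hl2 : (b, a) ∈ learned_edges <;>
      by_cases ht1 : (a, b) ∈ true_edges <;> by_cases ht2 : (b, a) ∈ true_edges <;>
      simp [pvPairCost, List.mem_filter, PySem.Set.mem_diff,
            PySem.Set.mem_ofList, hl1, hl2, ht1, ht2, hab]

-- ===== VERDICT (by name: the statement is the Claim_ definition above) =====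
theorem shd_spec : Claim_equal_shd := by
  intro learned_edges true_edges _
  show shd learned_edges true_edges = shd_alt learned_edges true_edges
  have hEnd : (PySem.Set.diff (PySem.Set.ofList learned_edges) (PySem.Set.ofList true_edges)).Nodup :=
    PySem.Set.nodup_diff _ _ (PySem.Set.nodup_ofList _)
  have hMnd : (PySem.Set.diff (PySem.Set.ofList true_edges) (PySem.Set.ofList learned_edges)).Nodup :=
    PySem.Set.nodup_diff _ _ (PySem.Set.nodup_ofList _)
  have hPnd : (PySem.List.dedup ((learned_edges ++ true_edges).map pvMinKey)).Nodup :=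
    PySem.List.nodup_dedup _
  have hkey : ∀ k ∈ PySem.List.dedup ((learned_edges ++ true_edges).map pvMinKey), k.1 ≤ k.2 := by
    intro k hk
    rcases List.mem_map.mp ((PySem.List.mem_dedup _ _).mp hk) with ⟨e, _, rfl⟩
    unfold pvMinKey
    split_ifs with h
    · exact h
    · exact le_of_not_ge h
  have hmem : ∀ x : String × String, x ∈ learned_edges ++ true_edges →
      pvMinKey x ∈ PySem.List.dedup ((learned_edges ++ true_edges).map pvMinKey) := by
    intro x hx
    exact (PySem.List.mem_dedup _ _).mpr (List.mem_map_of_mem hx)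
  have hmemE : ∀ x ∈ PySem.Set.diff (PySem.Set.ofList learned_edges) (PySem.Set.ofList true_edges),
      pvMinKey x ∈ PySem.List.dedup ((learned_edges ++ true_edges).map pvMinKey) := by
    intro x hx
    exact hmem x (List.mem_append.mpr (Or.inl
      ((PySem.Set.mem_ofList _ _).mp ((PySem.Set.mem_diff _ _ _).mp hx).1)))
  have hmemM : ∀ x ∈ PySem.Set.diff (PySem.Set.ofList true_edges) (PySem.Set.ofList learned_edges),
      pvMinKey x ∈ PySem.List.dedup ((learned_edges ++ true_edges).map pvMinKey) := by
    intro x hx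
    exact hmem x (List.mem_append.mpr (Or.inr
      ((PySem.Set.mem_ofList _ _).mp ((PySem.Set.mem_diff _ _ _).mp hx).1)))
  have hmemR : ∀ x ∈ (PySem.Set.diff (PySem.Set.ofList learned_edges) (PySem.Set.ofList true_edges)).filter
      (fun e => PySem.Set.contains (PySem.Set.diff (PySem.Set.ofList true_edges) (PySem.Set.ofList learned_edges)) (e.2, e.1)),
      pvMinKey x ∈ PySem.List.dedup ((learned_edges ++ true_edges).map pvMinKey) := by
    intro x hx
    exact hmemE x (List.mem_of_mem_filter hx)
  show ((PySem.Set.diff (PySem.Set.ofList learned_edges) (PySem.Set.ofList true_edges)).length : Int)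
      + ((PySem.Set.diff (PySem.Set.ofList true_edges) (PySem.Set.ofList learned_edges)).length : Int)
      - (((PySem.Set.diff (PySem.Set.ofList learned_edges) (PySem.Set.ofList true_edges)).foldl
          (fun r e => if PySem.Set.contains (PySem.Set.diff (PySem.Set.ofList true_edges) (PySem.Set.ofList learned_edges)) (e.2, e.1)
                      then PySem.Set.add r (e.1, e.2) else r) PySem.Set.empty).length : Int)
    = (PySem.List.dedup ((learned_edges ++ true_edges).map pvMinKey)).foldl
        (fun total k => total + pvPairCost (PySem.Set.ofList learned_edges) (PySem.Set.ofList true_edges) k) 0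
  rw [show (PySem.Set.empty : PySem.Set (String × String)) = ([] : List (String × String)) from rfl]
  rw [pv_fold_add_filter _ _ _ hEnd (by intro x _ hx; cases hx)]
  rw [List.nil_append]
  rw [PySem.List.foldl_add]
  rw [pv_length_partition _ hPnd _ hmemE, pv_length_partition _ hPnd _ hmemM,
      pv_length_partition _ hPnd _ hmemR, ← pv_sum_map_sub]
  have hcong : (PySem.List.dedup ((learned_edges ++ true_edges).map pvMinKey)).map
        (fun k =>
          (((PySem.Set.diff (PySem.Set.ofList learned_edges) (PySem.Set.ofList true_edges)).countP (fun x => decide (pvMinKey x = k)) : Nat) : Int)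
          + (((PySem.Set.diff (PySem.Set.ofList true_edges) (PySem.Set.ofList learned_edges)).countP (fun x => decide (pvMinKey x = k)) : Nat) : Int)
          - ((((PySem.Set.diff (PySem.Set.ofList learned_edges) (PySem.Set.ofList true_edges)).filter
              (fun e => PySem.Set.contains (PySem.Set.diff (PySem.Set.ofList true_edges) (PySem.Set.ofList learned_edges)) (e.2, e.1))).countP (fun x => decide (pvMinKey x = k)) : Nat) : Int))
      = (PySem.List.dedup ((learned_edges ++ true_edges).map pvMinKey)).map
          (fun k => pvPairCost (PySem.Set.ofList learned_edges) (PySem.Set.ofList true_edges) k) := by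
    apply List.map_congr_left
    intro k hk
    obtain ⟨a, b⟩ := k
    rw [pv_cnt_eq _ hEnd a b (hkey _ hk), pv_cnt_eq _ hMnd a b (hkey _ hk),
        pv_cnt_eq _ (List.Nodup.filter _ hEnd) a b (hkey _ hk),
        pv_cost_eq learned_edges true_edges a b (hkey _ hk)]
  rw [hcong]
  ring
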